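-- pv_equiv track=rewrite | github.com/djud6/sky | core/ChartCalculations/ChartCalculationsHelper.py | get_complete_and_incomplete_counts_for_process
-- ===== SOURCE A (Python) =====
-- def get_complete_and_incomplete_counts_for_process(compare_to, process_list, status_index=0):
--     complete_count = 0
--     incomplete_count = 0
--     for process in process_list:
--         if process[status_index] == compare_to:
--             complete_count += 1
--         else:
--             incomplete_count += 1
--     return complete_count, incomplete_count
-- ===== SOURCE B (Python) =====
-- def get_complete_and_incomplete_counts_for_process(compare_to, process_list, status_index=0):
--     freq = {}
--     for process in process_list:
--         status = process[status_index]
--         freq[status] = freq.get(status, 0) + 1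
--     complete = freq.get(compare_to, 0)
--     return complete, len(process_list) - complete
-- ===== Notes on version B (the rewrite author's own statement) =====
-- stated objective: alternative
-- what changed: B aggregates the statuses into a frequency dictionary in one pass and then answers by a single hash lookup (complete = freq.get(compare_to, 0), incomplete = total - complete), instead of A's loop with an if/else pair of counters compared against compare_to on every row.
import Mathlib
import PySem

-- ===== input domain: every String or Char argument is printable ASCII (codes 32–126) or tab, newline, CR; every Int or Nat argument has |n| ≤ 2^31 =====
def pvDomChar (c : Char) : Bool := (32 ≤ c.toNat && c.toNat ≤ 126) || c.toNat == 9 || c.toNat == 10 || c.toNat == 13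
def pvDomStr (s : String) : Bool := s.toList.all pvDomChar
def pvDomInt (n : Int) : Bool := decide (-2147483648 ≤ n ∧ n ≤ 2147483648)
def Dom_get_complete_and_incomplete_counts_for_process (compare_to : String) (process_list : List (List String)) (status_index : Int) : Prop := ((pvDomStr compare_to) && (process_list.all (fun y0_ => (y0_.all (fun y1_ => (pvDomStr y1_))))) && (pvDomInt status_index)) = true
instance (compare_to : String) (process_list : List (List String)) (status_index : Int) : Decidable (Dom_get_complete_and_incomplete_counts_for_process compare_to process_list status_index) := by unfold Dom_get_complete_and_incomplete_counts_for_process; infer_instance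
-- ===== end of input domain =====

-- B builds a frequency dictionary of the statuses in one pass and answers by a single
-- lookup (incomplete = total - complete), instead of A's if/else dual-counter loop:
-- an alternative aggregation-based algorithm, same O(n) cost.


-- ===== PORT A =====
-- A: one loop maintaining two counters; the index is Python's process[status_index] (pyGet?).
def get_complete_and_incomplete_counts_for_process (compare_to : String) (process_list : List (List String)) (status_index : Int) : Int × Int :=
  process_list.foldl
    (fun acc process =>
      if PySem.List.pyGet? process status_index = some compare_to then
        (acc.1 + 1, acc.2)
      else
        (acc.1, acc.2 + 1))
    (0, 0)

-- ===== PORT B =====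
-- B: build a frequency dict of the statuses (freq[s] = freq.get(s, 0) + 1), then look up
-- compare_to and derive incomplete from the length. Keys are Option String because the
-- Python indexing p[status_index] is pyGet? (none = IndexError, excluded by Pre_).
def get_complete_and_incomplete_counts_for_process_alt (compare_to : String) (process_list : List (List String)) (status_index : Int) : Int × Int :=
  let freq : PySem.Dict (Option String) Int :=
    process_list.foldl
      (fun d process =>
        let status := PySem.List.pyGet? process status_index
        d.insert status (d.getD status 0 + 1))
      PySem.Dict.empty
  let complete := freq.getD (some compare_to) 0
  (complete, (process_list.length : Int) - complete)

-- ===== PRECONDITION & SPEC =====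
-- Pre_ excludes exactly the inputs on which the Python A raises IndexError: some row too short
-- for status_index (Python negative indexing included).
def Pre_get_complete_and_incomplete_counts_for_process (compare_to : String) (process_list : List (List String)) (status_index : Int) : Prop :=
  ∀ p ∈ process_list, PySem.Raise.InRange p.length status_index
instance (compare_to : String) (process_list : List (List String)) (status_index : Int) : Decidable (Pre_get_complete_and_incomplete_counts_for_process compare_to process_list status_index) := by unfold Pre_get_complete_and_incomplete_counts_for_process; infer_instance

def pvWitness_get_complete_and_incomplete_counts_for_process : String × List (List String) × Int :=
  ("done", [["done", "x"], ["todo", "y"], ["done", "z"]], 0)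

def Spec_get_complete_and_incomplete_counts_for_process (compare_to : String) (process_list : List (List String)) (status_index : Int) (out : Int × Int) : Prop := out = get_complete_and_incomplete_counts_for_process_alt compare_to process_list status_index
instance (compare_to : String) (process_list : List (List String)) (status_index : Int) (out : Int × Int) : Decidable (Spec_get_complete_and_incomplete_counts_for_process compare_to process_list status_index out) := by unfold Spec_get_complete_and_incomplete_counts_for_process; infer_instance

-- ===== CLAIM =====
def Claim_equal_get_complete_and_incomplete_counts_for_process : Prop := ∀ (compare_to : String) (process_list : List (List String)) (status_index : Int), Dom_get_complete_and_incomplete_counts_for_process compare_to process_list status_index → Pre_get_complete_and_incomplete_counts_for_process compare_to process_list status_index → Spec_get_complete_and_incomplete_counts_for_process compare_to process_list status_index (get_complete_and_incomplete_counts_for_process compare_to process_list status_index)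

-- ===== LEMMAS AND PROOFS =====
-- A's dual-counter fold computes (match count, length - match count).
theorem pv_dual_fold (compare_to : String) (status_index : Int) (l : List (List String)) (a b : Int) :
    l.foldl (fun acc process =>
        if PySem.List.pyGet? process status_index = some compare_to then
          (acc.1 + 1, acc.2)
        else
          (acc.1, acc.2 + 1)) (a, b)
    = (a + ((l.map (fun p => PySem.List.pyGet? p status_index)).count (some compare_to) : Int),
       b + ((l.length : Int)
            - ((l.map (fun p => PySem.List.pyGet? p status_index)).count (some compare_to) : Int))) := by
  induction l generalizing a b with
  | nil => simp
  | cons h t ih =>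
    simp only [List.foldl_cons, List.map_cons, List.length_cons]
    by_cases hc : PySem.List.pyGet? h status_index = some compare_to
    · simp only [hc, reduceIte, List.count_cons_self]
      rw [ih]
      refine Prod.ext ?_ ?_ <;> simp <;> push_cast <;> ring
    · rw [if_neg hc, ih, List.count_cons_of_ne hc]
      refine Prod.ext ?_ ?_ <;> simp <;> push_cast <;> ring

-- B's dict-building fold over rows is the counter of the mapped status list.
theorem pv_freq_eq_counter (status_index : Int) (l : List (List String)) (d : PySem.Dict (Option String) Int) :
    l.foldl
      (fun d process =>
        let status := PySem.List.pyGet? process status_index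
        d.insert status (d.getD status 0 + 1)) d
    = (l.map (fun p => PySem.List.pyGet? p status_index)).foldl
        (fun d x => d.insert x (d.getD x 0 + 1)) d := by
  induction l generalizing d with
  | nil => rfl
  | cons h t ih => simp only [List.foldl_cons, List.map_cons]; exact ih _

-- ===== VERDICT =====
theorem get_complete_and_incomplete_counts_for_process_spec : Claim_equal_get_complete_and_incomplete_counts_for_process := by
  intro compare_to process_list status_index _ _
  unfold Spec_get_complete_and_incomplete_counts_for_process
  unfold get_complete_and_incomplete_counts_for_process get_complete_and_incomplete_counts_for_process_alt
  rw [pv_dual_fold, pv_freq_eq_counter, PySem.Dict.foldl_insert_getD_add_one_eq_counter]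
  simp [PySem.Dict.getD_counter]
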